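-- pv_equiv track=rewrite | github.com/codedstructure/aoc2023 | day18/step1.py | find_inside_point
-- ===== SOURCE A (Python) =====
-- def find_inside_point(grid, min_x, max_x, min_y, max_y):
--     # BROKEN: doesn't account for horizontal boundary edges
--     for y in range(min_y, max_y + 1):
--         for x in range(min_x, max_x + 1):
--             if (x, y) in grid:
--                 # only want an 'inside' point, not one on the boundary
--                 continue
--             # determine winding number.
--             wc = 0
--             for pos_x in range(x, max_x + 1):
--                 if (pos_x, y) in grid:
--                     wc += 1
--             if wc % 2:
--                 return (x, y)
-- ===== SOURCE B (Python) =====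
-- def find_inside_point(grid, min_x, max_x, min_y, max_y):
--     # Keep a running suffix count c = number of boundary cells at columns
--     # >= x in this row, instead of re-scanning the row tail for every cell.
--     cells = set(grid)
--     for y in range(min_y, max_y + 1):
--         c = sum((x, y) in cells for x in range(min_x, max_x + 1))
--         for x in range(min_x, max_x + 1):
--             if (x, y) in cells:
--                 c -= 1
--             elif c % 2:
--                 return (x, y)
--     return None
-- ===== Notes on version B (the rewrite author's own statement) =====
-- stated objective: alternative
-- what changed: B builds a set of boundary cells once and keeps a running per-row suffix crossing-count (decremented as x advances), replacing A's per-cell rescan of the row tail with O(n) list membership inside it; on the huge coordinate ranges of the timing inputs both remain range-bound, so no speed is claimed.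
import Mathlib
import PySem

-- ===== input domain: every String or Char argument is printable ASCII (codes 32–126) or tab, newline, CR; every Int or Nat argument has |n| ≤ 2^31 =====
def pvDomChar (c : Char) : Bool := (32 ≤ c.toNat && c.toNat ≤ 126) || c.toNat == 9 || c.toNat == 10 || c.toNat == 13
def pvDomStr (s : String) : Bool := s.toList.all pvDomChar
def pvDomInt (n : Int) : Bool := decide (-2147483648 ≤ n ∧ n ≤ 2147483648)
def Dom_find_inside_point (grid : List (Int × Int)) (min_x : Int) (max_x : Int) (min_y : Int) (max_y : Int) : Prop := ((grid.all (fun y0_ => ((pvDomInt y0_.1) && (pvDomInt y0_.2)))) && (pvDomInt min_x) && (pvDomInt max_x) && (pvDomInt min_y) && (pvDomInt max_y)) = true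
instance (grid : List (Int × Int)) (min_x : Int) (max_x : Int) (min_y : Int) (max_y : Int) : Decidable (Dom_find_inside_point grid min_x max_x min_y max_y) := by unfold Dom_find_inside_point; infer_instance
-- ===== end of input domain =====

-- B replaces A's per-cell ray-cast rescan of the row tail by a running per-row suffix
-- crossing-count over a prebuilt cell set (objective: alternative).

-- ===== PORT A =====
def find_inside_point (grid : List (Int × Int)) (min_x : Int) (max_x : Int) (min_y : Int) (max_y : Int) : Option (Int × Int) :=
  (PySem.List.pyRange min_y (max_y + 1)).findSome? (fun y =>
    (PySem.List.pyRange min_x (max_x + 1)).findSome? (fun x =>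
      if (x, y) ∈ grid then none
      else if PySem.Int.mod ((PySem.List.pyRange x (max_x + 1)).foldl
          (fun wc pos_x => if (pos_x, y) ∈ grid then wc + 1 else wc) (0 : Int)) 2 ≠ 0 then
        some (x, y)
      else none))

-- ===== PORT B =====
-- inner x-loop of Source B: carries the running suffix count c, with early return
def fipAltInner (cells : PySem.Set (Int × Int)) (y : Int) (xs : List Int) (c : Int) : Option (Int × Int) :=
  match xs with
  | [] => none
  | x :: rest =>
    if (x, y) ∈ cells then fipAltInner cells y rest (c - 1)
    else if PySem.Int.mod c 2 ≠ 0 then some (x, y)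
    else fipAltInner cells y rest c

def find_inside_point_alt (grid : List (Int × Int)) (min_x : Int) (max_x : Int) (min_y : Int) (max_y : Int) : Option (Int × Int) :=
  (PySem.List.pyRange min_y (max_y + 1)).findSome? (fun y =>
    fipAltInner (PySem.Set.ofList grid) y (PySem.List.pyRange min_x (max_x + 1))
      (((PySem.List.pyRange min_x (max_x + 1)).map
        (fun x => if (x, y) ∈ PySem.Set.ofList grid then (1 : Int) else 0)).sum))

-- ===== PRECONDITION & SPEC =====
def Spec_find_inside_point (grid : List (Int × Int)) (min_x : Int) (max_x : Int) (min_y : Int) (max_y : Int) (out : Option (Int × Int)) : Prop := out = find_inside_point_alt grid min_x max_x min_y max_y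
instance (grid : List (Int × Int)) (min_x : Int) (max_x : Int) (min_y : Int) (max_y : Int) (out : Option (Int × Int)) : Decidable (Spec_find_inside_point grid min_x max_x min_y max_y out) := by unfold Spec_find_inside_point; infer_instance

-- ===== CLAIM (what is proved, stated in full; the proofs are below) =====
def Claim_equal_find_inside_point : Prop := ∀ (grid : List (Int × Int)) (min_x : Int) (max_x : Int) (min_y : Int) (max_y : Int), Dom_find_inside_point grid min_x max_x min_y max_y → Spec_find_inside_point grid min_x max_x min_y max_y (find_inside_point grid min_x max_x min_y max_y)

-- ===== LEMMAS AND PROOFS =====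

-- the crossing count A computes at column x of row y (as an Int)
def fipCnt (grid : List (Int × Int)) (y b x : Int) : Int :=
  ((PySem.List.pyRange x b).countP (fun p => decide ((p, y) ∈ grid)) : Nat)

lemma fipCnt_cons (grid : List (Int × Int)) (y b x : Int) (h : x < b) :
    fipCnt grid y b x = (if (x, y) ∈ grid then 1 else 0) + fipCnt grid y b (x + 1) := by
  unfold fipCnt
  rw [PySem.List.pyRange_one_cons h, List.countP_cons]
  by_cases hm : (x, y) ∈ grid
  · simp [hm]; ring
  · simp [hm]

lemma fip_foldl_eq (grid : List (Int × Int)) (y b x : Int) :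
    (PySem.List.pyRange x b).foldl
      (fun wc pos_x => if (pos_x, y) ∈ grid then wc + 1 else wc) (0 : Int) = fipCnt grid y b x := by
  have hfun : (fun (wc : Int) pos_x => if (pos_x, y) ∈ grid then wc + 1 else wc) =
      (fun (wc : Int) pos_x => if (decide ((pos_x, y) ∈ grid)) = true then wc + 1 else wc) := by
    funext wc p
    by_cases h : (p, y) ∈ grid <;> simp [h]
  rw [hfun, PySem.List.foldl_count_if]
  simp [fipCnt]

lemma fip_sum_eq (grid : List (Int × Int)) (y b x : Int) :
    ((PySem.List.pyRange x b).map
      (fun p => if (p, y) ∈ PySem.Set.ofList grid then (1 : Int) else 0)).sum = fipCnt grid y b x := by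
  have hfun : (fun p => if (p, y) ∈ PySem.Set.ofList grid then (1 : Int) else 0) =
      (fun p => if (decide ((p, y) ∈ grid)) = true then (1 : Int) else 0) := by
    funext p
    by_cases h : (p, y) ∈ grid
    · simp [h, (PySem.Set.mem_ofList grid (p, y)).mpr h]
    · have h' : ¬ (p, y) ∈ PySem.Set.ofList grid := by rw [PySem.Set.mem_ofList]; exact h
      simp [h, h']
  rw [hfun, PySem.List.sum_map_ite_one_zero]
  simp [fipCnt]

lemma fip_inner_eq (grid : List (Int × Int)) (y b : Int) :
    ∀ (n : Nat) (a : Int), (b - a).toNat = n →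
    fipAltInner (PySem.Set.ofList grid) y (PySem.List.pyRange a b) (fipCnt grid y b a) =
    (PySem.List.pyRange a b).findSome? (fun x =>
      if (x, y) ∈ grid then none
      else if PySem.Int.mod ((PySem.List.pyRange x b).foldl
          (fun wc pos_x => if (pos_x, y) ∈ grid then wc + 1 else wc) (0 : Int)) 2 ≠ 0 then
        some (x, y)
      else none) := by
  intro n
  induction n with
  | zero =>
    intro a ha
    have : PySem.List.pyRange a b = [] := by
      simp [PySem.List.pyRange]; omega
    simp [this, fipAltInner]
  | succ n ih =>
    intro a ha
    have hab : a < b := by omega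
    have ihx := ih (a + 1) (by omega)
    rw [PySem.List.pyRange_one_cons hab]
    by_cases hm : (a, y) ∈ grid
    · have hmc : (a, y) ∈ PySem.Set.ofList grid := (PySem.Set.mem_ofList grid (a, y)).mpr hm
      have hc : fipCnt grid y b a - 1 = fipCnt grid y b (a + 1) := by
        rw [fipCnt_cons grid y b a hab]; simp [hm]
      simp only [fipAltInner, List.findSome?, hmc, hm, reduceIte, hc]
      exact ihx
    · have hmc : ¬ (a, y) ∈ PySem.Set.ofList grid := by
        rw [PySem.Set.mem_ofList]; exact hm
      have hc : fipCnt grid y b a = fipCnt grid y b (a + 1) := by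
        rw [fipCnt_cons grid y b a hab]; simp [hm]
      simp only [fipAltInner, List.findSome?, hmc, hm, reduceIte, fip_foldl_eq grid y b a]
      by_cases hp : PySem.Int.mod (fipCnt grid y b a) 2 ≠ 0
      · rw [if_pos hp, if_pos hp]
      · rw [if_neg hp, if_neg hp, hc]
        exact ihx

-- ===== VERDICT (by name: the statement is the Claim_ definition above) =====
theorem find_inside_point_spec : Claim_equal_find_inside_point := by
  intro grid min_x max_x min_y max_y _
  unfold Spec_find_inside_point find_inside_point find_inside_point_alt
  congr 1
  funext y
  rw [fip_sum_eq grid y (max_x + 1) min_x]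
  exact (fip_inner_eq grid y (max_x + 1) ((max_x + 1 - min_x)).toNat min_x rfl).symm
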